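-- pv_equiv track=rewrite | github.com/0921sean/Programmers | Programmers_KIT/Stack_Queue/develop.py | solution
-- ===== SOURCE A (Python) =====
-- import math
--
-- def solution(progresses, speeds):
--     left_times = []
--     answer = []
--
--     for i in range(len(progresses)):
--         left_times.append(math.ceil((100 - progresses[i]) / speeds[i]))
--
--     max_time = left_times[0]
--     push_num = 0    # 작업을 동시에 배포하는 개수
--     for time in left_times:
--         # 만약 현재 작업의 남은 시간이 최대 시간보다 크면, 동시에 배포하는 개수를 업로드하고 초기화
--         if time > max_time:
--             max_time = time
--             answer.append(push_num)
--             push_num = 1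
--         # 만약 현재 작업의 남은 시간이 최대 시간보다 작거나 같으면, 동시에 배포하는 개수를 증가시킴
--         else:
--             push_num += 1
--     # 마지막 작업의 개수를 추가
--     answer.append(push_num)
--
--     return answer
-- ===== SOURCE B (Python) =====
-- import math
-- from collections import deque
--
--
-- def solution(progresses, speeds):
--     q = deque(math.ceil((100 - p) / s) for p, s in zip(progresses, speeds))
--     answer = []
--     while q:
--         leader = q.popleft()
--         count = 1
--         while q and q[0] <= leader:
--             q.popleft()
--             count += 1
--         answer.append(count)
--     return answer
-- ===== Notes on version B (the rewrite author's own statement) =====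
-- stated objective: alternative
-- what changed: A makes one flat pass maintaining a running maximum and a pending counter; B consumes an explicit deque with a nested leader/followers loop, popping each group's leader and then every immediately following time <= that leader.
import Mathlib
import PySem

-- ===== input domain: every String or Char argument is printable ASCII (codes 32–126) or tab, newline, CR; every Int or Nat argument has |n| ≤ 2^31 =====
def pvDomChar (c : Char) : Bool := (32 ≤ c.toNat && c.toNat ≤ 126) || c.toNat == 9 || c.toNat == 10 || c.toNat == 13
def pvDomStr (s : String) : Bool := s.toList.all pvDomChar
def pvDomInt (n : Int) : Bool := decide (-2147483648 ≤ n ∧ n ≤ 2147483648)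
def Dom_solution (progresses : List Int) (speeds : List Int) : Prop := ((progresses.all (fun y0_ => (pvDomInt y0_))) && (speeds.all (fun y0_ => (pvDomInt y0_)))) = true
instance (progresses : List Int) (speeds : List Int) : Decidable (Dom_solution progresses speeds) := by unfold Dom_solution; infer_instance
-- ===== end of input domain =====

-- B replaces A's flat pass with a running max by a nested leader/followers traversal of an explicit queue (objective: alternative).
-- On the admitted domain (|ints| ≤ 2^31), math.ceil((100-p)/s) equals exact ceiling division, ported as -((-(100-p)) // s).

-- ===== PORT A =====
def solution (progresses : List Int) (speeds : List Int) : List Int :=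
  let left_times := (PySem.List.pyRange 0 (progresses.length : Int) 1).foldl
    (fun acc i => acc ++ [-(PySem.Int.floordiv (-(100 - PySem.List.pyGetD progresses i 0)) (PySem.List.pyGetD speeds i 0))]) []
  let max_time := PySem.List.pyGetD left_times 0 0
  let st := left_times.foldl
    (fun (st : List Int × Int × Int) time =>
      if time > st.2.2 then (st.1 ++ [st.2.1], 1, time) else (st.1, st.2.1 + 1, st.2.2))
    ([], 0, max_time)
  st.1 ++ [st.2.1]

-- ===== PORT B =====
-- the deque of remaining times (zip truncates, as in Source B)
def pvCeilTimes (progresses : List Int) (speeds : List Int) : List Int :=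
  (progresses.zip speeds).map (fun ps => -(PySem.Int.floordiv (-(100 - ps.1)) ps.2))

-- the inner while loop: count and drop the leading elements ≤ leader
def pvTakeCount (leader : Int) : List Int → Int × List Int
  | [] => (0, [])
  | x :: xs =>
      if x ≤ leader then ((pvTakeCount leader xs).1 + 1, (pvTakeCount leader xs).2)
      else (0, x :: xs)

theorem pvTakeCount_len (leader : Int) (xs : List Int) :
    (pvTakeCount leader xs).2.length ≤ xs.length := by
  induction xs with
  | nil => simp [pvTakeCount]
  | cons x xs ih =>
      by_cases h : x ≤ leader
      · simp [pvTakeCount, h]; omega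
      · simp [pvTakeCount, h]

-- the outer while loop over the queue
def pvGroups : List Int → List Int
  | [] => []
  | leader :: rest =>
      (1 + (pvTakeCount leader rest).1) :: pvGroups (pvTakeCount leader rest).2
termination_by l => l.length
decreasing_by exact Nat.lt_succ_of_le (pvTakeCount_len leader rest)

def solution_alt (progresses : List Int) (speeds : List Int) : List Int :=
  pvGroups (pvCeilTimes progresses speeds)

-- ===== PRECONDITION & SPEC =====
-- Pre_ excludes exactly the inputs where A raises: empty progresses / speeds shorter than
-- progresses (IndexError) and a zero among the used speeds (ZeroDivisionError).
def Pre_solution (progresses : List Int) (speeds : List Int) : Prop :=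
  progresses ≠ [] ∧ progresses.length ≤ speeds.length ∧
    ∀ s ∈ speeds.take progresses.length, s ≠ 0
instance (progresses : List Int) (speeds : List Int) : Decidable (Pre_solution progresses speeds) := by unfold Pre_solution; infer_instance

def pvWitness_solution : List Int × List Int := ([30, 55, 99], [30, 5, 10])

def Spec_solution (progresses : List Int) (speeds : List Int) (out : List Int) : Prop := out = solution_alt progresses speeds
instance (progresses : List Int) (speeds : List Int) (out : List Int) : Decidable (Spec_solution progresses speeds out) := by unfold Spec_solution; infer_instance

-- ===== CLAIM (what is proved, stated in full; the proofs are below) =====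
def Claim_equal_solution : Prop := ∀ (progresses : List Int) (speeds : List Int), Dom_solution progresses speeds → Pre_solution progresses speeds → Spec_solution progresses speeds (solution progresses speeds)

-- ===== LEMMAS AND PROOFS =====

-- A's second loop, rephrased as a recursion carried by (current max, pending count)
def pvGroupsFrom (mt pn : Int) : List Int → List Int
  | [] => [pn]
  | t :: ts => if t > mt then pn :: pvGroupsFrom t 1 ts else pvGroupsFrom mt (pn + 1) ts

theorem pvFoldA (l : List Int) (ans : List Int) (pn mt : Int) :
    (let st := l.foldl
        (fun (st : List Int × Int × Int) time =>
          if time > st.2.2 then (st.1 ++ [st.2.1], 1, time) else (st.1, st.2.1 + 1, st.2.2))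
        (ans, pn, mt)
     st.1 ++ [st.2.1]) = ans ++ pvGroupsFrom mt pn l := by
  induction l generalizing ans pn mt with
  | nil => simp [pvGroupsFrom]
  | cons t ts ih =>
      by_cases h : t > mt
      · simp [pvGroupsFrom, h, List.foldl_cons, ih]
      · simp [pvGroupsFrom, h, List.foldl_cons, ih]

theorem pvGroupsFrom_eq (l : List Int) (mt pn : Int) :
    pvGroupsFrom mt pn l = (pn + (pvTakeCount mt l).1) :: pvGroups (pvTakeCount mt l).2 := by
  induction l generalizing mt pn with
  | nil => simp [pvGroupsFrom, pvTakeCount, pvGroups]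
  | cons t ts ih =>
      by_cases h : t > mt
      · have h' : ¬ t ≤ mt := by omega
        simp only [pvGroupsFrom, pvTakeCount, if_pos h, if_neg h']
        rw [ih t 1]
        simp [pvGroups]
      · have h' : t ≤ mt := by omega
        simp only [pvGroupsFrom, pvTakeCount, if_neg h, if_pos h']
        rw [ih]
        congr 1
        omega

-- under Pre, A's left_times list equals B's zipped times
theorem pvTimes_eq (progresses speeds : List Int)
    (hlen : progresses.length ≤ speeds.length) :
    (PySem.List.pyRange 0 (progresses.length : Int) 1).foldl
      (fun acc i => acc ++ [-(PySem.Int.floordiv (-(100 - PySem.List.pyGetD progresses i 0)) (PySem.List.pyGetD speeds i 0))]) []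
      = pvCeilTimes progresses speeds := by
  rw [PySem.List.foldl_append_singleton_eq_map]
  unfold pvCeilTimes
  apply List.ext_getElem
  · simp [PySem.List.length_pyRange_one, List.length_zip]
    omega
  · intro k h1 h2
    have hk : k < progresses.length := by
      simpa [PySem.List.length_pyRange_one] using h1
    have hks : k < speeds.length := by omega
    simp only [List.nil_append, List.getElem_map, PySem.List.getElem_pyRange_one, List.getElem_zip]
    rw [show ((0 : Int) + k) = (k : Int) by omega]
    rw [PySem.List.pyGetD_natCast _ _ _, PySem.List.pyGetD_natCast _ _ _]
    simp [hk, hks, List.getD_eq_getElem?_getD]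

-- ===== VERDICT (by name: the statement is the Claim_ definition above) =====
theorem solution_spec : Claim_equal_solution := by
  intro progresses speeds _ hpre
  obtain ⟨hne, hlen, _⟩ := hpre
  unfold Spec_solution solution solution_alt
  simp only
  rw [pvTimes_eq progresses speeds hlen]
  have hlp : 0 < progresses.length := List.length_pos_iff.mpr hne
  have hne' : pvCeilTimes progresses speeds ≠ [] := by
    unfold pvCeilTimes
    rw [← List.length_pos_iff]
    simp [List.length_zip]
    omega
  obtain ⟨m, rest, hms⟩ := List.exists_cons_of_ne_nil hne'
  rw [hms]
  have hget : PySem.List.pyGetD (m :: rest) (0 : Int) 0 = m := by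
    simpa using PySem.List.pyGetD_natCast (m :: rest) 0 0
  rw [hget, pvFoldA]
  have hnm : ¬ (m > m) := by omega
  simp only [pvGroupsFrom, if_neg hnm, List.nil_append]
  rw [pvGroupsFrom_eq]
  simp [pvGroups]
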